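-- pv_equiv track=rewrite | github.com/pritchardn/BlockDAG | examples/binomial.py | _binomial_tree
-- ===== SOURCE A (Python) =====
-- def _binomial_tree(size):
--     num_nodes = 1
--     edges = []
--     vertices = {}
--     for i in range(size):
--         edges += [(edge[0] + num_nodes, edge[1] + num_nodes) for edge in edges]
--         edges += [(0, num_nodes)]
--         num_nodes *= 2
--     for i in range(num_nodes):
--         vertices[i] = {"data": i}
--     return vertices, edges
-- ===== SOURCE B (Python) =====
-- def _binomial_tree(size):
--     def build(k):
--         if k == 0:
--             return []
--         prev = build(k - 1)
--         half = 1 << (k - 1)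
--         return prev + [(a + half, b + half) for (a, b) in prev] + [(0, half)]
--
--     k = size if size > 0 else 0
--     vertices = {i: {"data": i} for i in range(1 << k)}
--     return vertices, build(k)
-- ===== Notes on version B (the rewrite author's own statement) =====
-- stated objective: alternative
-- what changed: Replaces the in-place doubling loop over a mutable edge list with a divide-and-conquer recursion build(k) on the binomial tree's self-similar structure (build(k-1) plus a shifted copy plus the bridge edge), and builds vertices by a comprehension over 2**k nodes.
import Mathlib
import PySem

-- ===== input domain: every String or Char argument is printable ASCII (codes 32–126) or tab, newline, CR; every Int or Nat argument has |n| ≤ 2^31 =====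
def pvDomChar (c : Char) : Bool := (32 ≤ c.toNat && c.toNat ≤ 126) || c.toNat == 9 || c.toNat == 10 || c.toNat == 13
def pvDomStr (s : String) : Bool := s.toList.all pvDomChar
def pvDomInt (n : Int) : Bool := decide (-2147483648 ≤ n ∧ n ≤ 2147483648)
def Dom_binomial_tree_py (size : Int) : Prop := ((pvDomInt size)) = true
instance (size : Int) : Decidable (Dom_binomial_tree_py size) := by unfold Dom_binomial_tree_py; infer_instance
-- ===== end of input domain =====

-- B replaces A's in-place doubling loop over the edge list with divide-and-conquer recursion on the tree's self-similar structure (alternative decomposition, same cost).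
-- ===== PORT A =====
def binomial_tree_py (size : Int) : (List (Int × List (String × Int))) × (List (Int × Int)) :=
  let st := (PySem.List.pyRange 0 size 1).foldl
    (fun (st : Int × List (Int × Int)) _ =>
      let edges := st.2 ++ st.2.map (fun edge => (edge.1 + st.1, edge.2 + st.1))
      let edges := edges ++ [(0, st.1)]
      (st.1 * 2, edges)) (1, [])
  let vertices := (PySem.List.pyRange 0 st.1 1).foldl
    (fun (d : List (Int × List (String × Int))) i => d ++ [(i, [("data", i)])]) []
  (vertices, st.2)

-- ===== PORT B =====
def buildEdges : Nat → List (Int × Int)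
  | 0 => []
  | k + 1 =>
    let prev := buildEdges k
    let half : Int := 2 ^ k
    prev ++ prev.map (fun p => (p.1 + half, p.2 + half)) ++ [(0, half)]

def binomial_tree_py_alt (size : Int) : (List (Int × List (String × Int))) × (List (Int × Int)) :=
  let k := size.toNat
  let vertices := (PySem.List.pyRange 0 ((2 : Int) ^ k) 1).map (fun i => (i, [("data", i)]))
  (vertices, buildEdges k)

-- ===== PRECONDITION & SPEC =====
def Spec_binomial_tree_py (size : Int) (out : (List (Int × List (String × Int))) × (List (Int × Int))) : Prop := out = binomial_tree_py_alt size
instance (size : Int) (out : (List (Int × List (String × Int))) × (List (Int × Int))) : Decidable (Spec_binomial_tree_py size out) := by unfold Spec_binomial_tree_py; infer_instance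

-- ===== CLAIM (what is proved, stated in full; the proofs are below) =====
def Claim_equal_binomial_tree_py : Prop := ∀ (size : Int), Dom_binomial_tree_py size → Spec_binomial_tree_py size (binomial_tree_py size)

-- ===== LEMMAS AND PROOFS =====

theorem flatten_map_singleton {α β : Type} (f : α → β) (xs : List α) :
    (xs.map (fun x => [f x])).flatten = xs.map f := by
  induction xs with
  | nil => rfl
  | cons x xs ih => simp [ih]

theorem loop_eq (step : Int × List (Int × Int) → Int → Int × List (Int × Int))
    (hstep : step = fun st _ =>
      let edges := st.2 ++ st.2.map (fun edge => (edge.1 + st.1, edge.2 + st.1))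
      let edges := edges ++ [(0, st.1)]
      (st.1 * 2, edges)) :
    ∀ (n : Nat),
      (PySem.List.pyRange 0 (n : Int) 1).foldl step (1, []) = ((2 : Int) ^ n, buildEdges n) := by
  intro n
  induction n with
  | zero => simp [PySem.List.pyRange_one_eq_nil, buildEdges]
  | succ k ih =>
    have h : ((k : Int) + 1) = ((k : Int) + 1) := rfl
    rw [show ((k + 1 : Nat) : Int) = (k : Int) + 1 by push_cast; ring,
        PySem.List.pyRange_one_succ_right (by positivity),
        List.foldl_append, ih, hstep]
    simp [buildEdges, pow_succ, mul_comm, List.append_assoc]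

theorem binomial_tree_eq (size : Int) :
    binomial_tree_py size = binomial_tree_py_alt size := by
  unfold binomial_tree_py binomial_tree_py_alt
  have hrange : PySem.List.pyRange 0 size 1 = PySem.List.pyRange 0 (size.toNat : Int) 1 := by
    by_cases h : size ≤ 0
    · rw [PySem.List.pyRange_one_eq_nil h, PySem.List.pyRange_one_eq_nil (by omega)]
    · rw [Int.toNat_of_nonneg (by omega)]
  rw [hrange, loop_eq _ rfl size.toNat]
  simp [flatten_map_singleton]

-- ===== VERDICT (by name: the statement is the Claim_ definition above) =====
theorem binomial_tree_py_spec : Claim_equal_binomial_tree_py := by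
  intro size _
  exact binomial_tree_eq size
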